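-- pv_equiv track=rewrite | github.com/kgw0124/Algorithm-Study | 프로그래머스/0/181893. 배열 조각하기/배열 조각하기.py | solution
-- ===== SOURCE A (Python) =====
-- def solution(arr, query):
--     answer = []
--     for i in range(len(query)):
--         if i == 0:
--             answer = arr[:query[i]+1]
--         if i%2 == 0:
--             answer = answer[:query[i]+1]
--         else:
--             answer = answer[query[i]:]
--     return answer
-- ===== SOURCE B (Python) =====
-- def _clip(s, n):
--     # Python slice-bound normalization: negative indexes count from the end,
--     # then clamp into [0, n].
--     if s < 0:
--         s += n
--     return min(max(s, 0), n)
--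
--
-- def solution(arr, query):
--     # Track the live window [lo, hi) of arr instead of copying slices.
--     lo, hi = 0, 0
--     for i, q in enumerate(query):
--         if i == 0:
--             lo, hi = 0, _clip(q + 1, len(arr))
--         if i % 2 == 0:
--             hi = lo + _clip(q + 1, hi - lo)
--         else:
--             lo = lo + _clip(q, hi - lo)
--     return arr[lo:hi]
-- ===== Notes on version B (the rewrite author's own statement) =====
-- stated objective: alternative
-- what changed: Instead of materializing a new list for every query slice, B tracks the live window as a pair of indices (lo, hi) into arr, updated once per query, and takes one final slice; it trades C-level list slicing for index arithmetic.
import Mathlib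
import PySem

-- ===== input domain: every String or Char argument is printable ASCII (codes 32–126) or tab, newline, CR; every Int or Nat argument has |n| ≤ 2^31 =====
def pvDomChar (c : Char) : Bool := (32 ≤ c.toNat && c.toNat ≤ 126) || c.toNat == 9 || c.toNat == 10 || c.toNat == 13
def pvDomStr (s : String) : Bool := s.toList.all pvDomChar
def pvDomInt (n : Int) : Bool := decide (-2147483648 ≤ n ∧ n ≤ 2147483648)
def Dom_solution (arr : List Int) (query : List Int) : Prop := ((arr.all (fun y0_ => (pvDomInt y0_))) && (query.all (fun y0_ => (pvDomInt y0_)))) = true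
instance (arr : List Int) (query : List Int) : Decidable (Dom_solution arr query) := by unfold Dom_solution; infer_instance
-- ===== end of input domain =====

-- B replaces A's repeated list slicing by tracking the live window [lo, hi) of arr as a pair
-- of indices, one update per query, and taking a single final slice (objective: alternative).


-- ===== PORT A =====
def solution (arr : List Int) (query : List Int) : List Int :=
  (List.range query.length).foldl
    (fun answer (i : Nat) =>
      let answer := if i = 0 then PySem.List.slice arr none (some (PySem.List.pyGetD query (i : Int) 0 + 1)) else answer
      if i % 2 = 0 then PySem.List.slice answer none (some (PySem.List.pyGetD query (i : Int) 0 + 1))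
      else PySem.List.slice answer (some (PySem.List.pyGetD query (i : Int) 0)) none)
    []

-- ===== PORT B =====
-- Python slice-bound normalization (_clip in Source B): negative from the end, clamp to [0, n]
def pvClip (s n : Int) : Int := min (max (if s < 0 then s + n else s) 0) n

def solution_alt (arr : List Int) (query : List Int) : List Int :=
  let p := (query.zipIdx).foldl
    (fun (p : Int × Int) (qi : Int × Nat) =>
      let p := if qi.2 = 0 then ((0 : Int), pvClip (qi.1 + 1) (arr.length : Int)) else p
      if qi.2 % 2 = 0 then (p.1, p.1 + pvClip (qi.1 + 1) (p.2 - p.1))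
      else (p.1 + pvClip qi.1 (p.2 - p.1), p.2))
    ((0 : Int), (0 : Int))
  PySem.List.slice arr (some p.1) (some p.2)

-- ===== PRECONDITION & SPEC =====
def Spec_solution (arr : List Int) (query : List Int) (out : List Int) : Prop := out = solution_alt arr query
instance (arr : List Int) (query : List Int) (out : List Int) : Decidable (Spec_solution arr query out) := by unfold Spec_solution; infer_instance

-- ===== CLAIM (what is proved, stated in full; the proofs are below) =====
def Claim_equal_solution : Prop := ∀ (arr : List Int) (query : List Int), Dom_solution arr query → Spec_solution arr query (solution arr query)

-- ===== LEMMAS AND PROOFS =====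

-- A's loop body (proof helper; `solution` reduces to a fold of this)
def gA (arr : List Int) (ans : List Int) (q : Int) (i : Nat) : List Int :=
  let ans := if i = 0 then PySem.List.slice arr none (some (q + 1)) else ans
  if i % 2 = 0 then PySem.List.slice ans none (some (q + 1))
  else PySem.List.slice ans (some q) none

-- B's loop body (proof helper)
def gB (arr : List Int) (p : Int × Int) (q : Int) (i : Nat) : Int × Int :=
  let p := if i = 0 then ((0 : Int), pvClip (q + 1) (arr.length : Int)) else p
  if i % 2 = 0 then (p.1, p.1 + pvClip (q + 1) (p.2 - p.1))
  else (p.1 + pvClip q (p.2 - p.1), p.2)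

lemma foldl_range_eq_zipIdx {σ : Type} (g : σ → Int → Nat → σ) :
    ∀ (l : List Int) (k : Nat) (s : σ),
      (List.range l.length).foldl (fun (s : σ) (i : Nat) => g s (PySem.List.pyGetD l (i : Int) 0) (i + k)) s
        = (l.zipIdx k).foldl (fun s qi => g s qi.1 qi.2) s := by
  intro l
  induction l with
  | nil => intro k s; simp
  | cons x rest ih =>
    intro k s
    simp only [List.length_cons, List.range_succ_eq_map, List.foldl_cons, List.foldl_map,
      List.zipIdx_cons, PySem.List.pyGetD_natCast]
    simp only [List.getD_cons_zero, List.getD_cons_succ, Nat.zero_add]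
    have := ih (k + 1) (g s x k)
    simp only [PySem.List.pyGetD_natCast] at this
    have hfun : (fun (s : σ) (i : Nat) => g s (rest.getD i 0) (i + 1 + k))
        = (fun (s : σ) (i : Nat) => g s (rest.getD i 0) (i + (k + 1))) := by
      funext s' i
      rw [show i + 1 + k = i + (k + 1) by omega]
    rw [hfun]
    exact this

def InvP (arr : List Int) (ans : List Int) (p : Int × Int) : Prop :=
  ans = PySem.List.slice arr (some p.1) (some p.2) ∧ 0 ≤ p.1 ∧ p.1 ≤ p.2 ∧ p.2 ≤ (arr.length : Int)

lemma clip_bounds (s n : Int) (hn : 0 ≤ n) : 0 ≤ pvClip s n ∧ pvClip s n ≤ n := by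
  simp only [pvClip]; split <;> omega

lemma clip_eq_clampIdx (s : Int) (n : Nat) : pvClip s ↑n = ↑(PySem.List.clampIdx n s) := by
  simp [pvClip, PySem.List.clampIdx]; omega

lemma slice_none_some' {α : Type} (xs : List α) (s : Int) :
    PySem.List.slice xs none (some s) = xs.take (PySem.List.clampIdx xs.length s) := by
  simp [PySem.List.slice]

lemma take_window (arr : List Int) (lo hi s : Int)
    (h0 : 0 ≤ lo) (h1 : lo ≤ hi) (h2 : hi ≤ (arr.length : Int)) :
    PySem.List.slice (PySem.List.slice arr (some lo) (some hi)) none (some s)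
      = PySem.List.slice arr (some lo) (some (lo + pvClip s (hi - lo))) := by
  have hsub : PySem.List.slice arr (some lo) (some hi)
      = (arr.drop lo.toNat).take (hi.toNat - lo.toNat) :=
    PySem.List.slice_of_nonneg arr h0 (by omega) (by omega) h2
  have hlen : (PySem.List.slice arr (some lo) (some hi)).length = hi.toNat - lo.toNat := by
    rw [hsub]; simp; omega
  have hc := clip_bounds s (hi - lo) (by omega)
  have hcl : pvClip s (hi - lo) = ↑(PySem.List.clampIdx (hi.toNat - lo.toNat) s) := by
    have : hi - lo = ((hi.toNat - lo.toNat : Nat) : Int) := by omega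
    rw [this, clip_eq_clampIdx]
  rw [slice_none_some', hlen, hsub,
    PySem.List.slice_of_nonneg arr h0 (by omega) (by omega) (by omega),
    List.take_take]
  congr 1
  omega

lemma drop_window (arr : List Int) (lo hi s : Int)
    (h0 : 0 ≤ lo) (h1 : lo ≤ hi) (h2 : hi ≤ (arr.length : Int)) :
    PySem.List.slice (PySem.List.slice arr (some lo) (some hi)) (some s) none
      = PySem.List.slice arr (some (lo + pvClip s (hi - lo))) (some hi) := by
  have hsub : PySem.List.slice arr (some lo) (some hi)
      = (arr.drop lo.toNat).take (hi.toNat - lo.toNat) :=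
    PySem.List.slice_of_nonneg arr h0 (by omega) (by omega) h2
  have hlen : (PySem.List.slice arr (some lo) (some hi)).length = hi.toNat - lo.toNat := by
    rw [hsub]; simp; omega
  have hc := clip_bounds s (hi - lo) (by omega)
  have hcl : pvClip s (hi - lo) = ↑(PySem.List.clampIdx (hi.toNat - lo.toNat) s) := by
    have : hi - lo = ((hi.toNat - lo.toNat : Nat) : Int) := by omega
    rw [this, clip_eq_clampIdx]
  rw [PySem.List.slice_some_none, hlen, hsub,
    PySem.List.slice_of_nonneg arr (by omega) (by omega) (by omega) h2,
    List.drop_take, List.drop_drop]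
  have e1 : (lo + pvClip s (hi - lo)).toNat = lo.toNat + PySem.List.clampIdx (hi.toNat - lo.toNat) s := by omega
  rw [e1]
  rw [show hi.toNat - (lo.toNat + PySem.List.clampIdx (hi.toNat - lo.toNat) s)
      = hi.toNat - lo.toNat - PySem.List.clampIdx (hi.toNat - lo.toNat) s by omega]

lemma step_inv (arr : List Int) (ans : List Int) (p : Int × Int) (q : Int) (i : Nat)
    (h : InvP arr ans p) : InvP arr (gA arr ans q i) (gB arr p q i) := by
  obtain ⟨hans, h0, h1, h2⟩ := h
  have base : InvP arr (if i = 0 then PySem.List.slice arr none (some (q + 1)) else ans)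
      (if i = 0 then ((0 : Int), pvClip (q + 1) (arr.length : Int)) else p) := by
    by_cases hi : i = 0
    · simp only [hi, if_pos]
      have hc := clip_bounds (q + 1) (arr.length : Int) (by positivity)
      refine ⟨?_, le_refl 0, hc.1, hc.2⟩
      have harr : PySem.List.slice arr (some 0) (some (arr.length : Int)) = arr := by
        rw [PySem.List.slice_of_nonneg arr le_rfl (by positivity) (by positivity) le_rfl]
        simp
      have := take_window arr 0 (arr.length : Int) (q + 1) le_rfl (by positivity) le_rfl
      rw [harr] at this
      rw [this]
      norm_num
    · simp only [hi, if_false]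
      exact ⟨hans, h0, h1, h2⟩
  obtain ⟨bans, b0, b1, b2⟩ := base
  set ans' := if i = 0 then PySem.List.slice arr none (some (q + 1)) else ans with hans'
  set p' := (if i = 0 then ((0 : Int), pvClip (q + 1) (arr.length : Int)) else p) with hp'
  simp only [gA, gB, ← hans', ← hp']
  by_cases he : i % 2 = 0
  · simp only [he, if_pos]
    have hc := clip_bounds (q + 1) (p'.2 - p'.1) (by omega)
    refine ⟨?_, b0, by omega, by omega⟩
    rw [bans, take_window arr p'.1 p'.2 (q + 1) b0 b1 b2]
  · simp only [he, ite_false]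
    have hc := clip_bounds q (p'.2 - p'.1) (by omega)
    refine ⟨?_, by omega, by omega, b2⟩
    rw [bans, drop_window arr p'.1 p'.2 q b0 b1 b2]

lemma fold_inv (arr : List Int) :
    ∀ (L : List (Int × Nat)) (ans : List Int) (p : Int × Int), InvP arr ans p →
      InvP arr (L.foldl (fun ans qi => gA arr ans qi.1 qi.2) ans)
        (L.foldl (fun p qi => gB arr p qi.1 qi.2) p) := by
  intro L
  induction L with
  | nil => intro ans p h; exact h
  | cons x rest ih =>
    intro ans p h
    exact ih _ _ (step_inv arr ans p x.1 x.2 h)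

lemma solution_eq_fold (arr query : List Int) :
    solution arr query = (query.zipIdx).foldl (fun ans qi => gA arr ans qi.1 qi.2) [] := by
  have h := foldl_range_eq_zipIdx (gA arr) query 0 []
  simp only [Nat.add_zero] at h
  rw [← h]
  unfold solution gA
  rfl

lemma solution_alt_eq_fold (arr query : List Int) :
    solution_alt arr query =
      PySem.List.slice arr
        (some ((query.zipIdx).foldl (fun p qi => gB arr p qi.1 qi.2) ((0 : Int), (0 : Int))).1)
        (some ((query.zipIdx).foldl (fun p qi => gB arr p qi.1 qi.2) ((0 : Int), (0 : Int))).2) := rfl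

-- ===== VERDICT (by name: the statement is the Claim_ definition above) =====
theorem solution_spec : Claim_equal_solution := by
  intro arr query _
  unfold Spec_solution
  have hbase : InvP arr [] ((0 : Int), (0 : Int)) := by
    refine ⟨?_, le_rfl, le_rfl, by positivity⟩
    rw [PySem.List.slice_of_nonneg arr le_rfl le_rfl (by positivity) (by positivity)]
    simp
  have h := fold_inv arr query.zipIdx [] ((0 : Int), (0 : Int)) hbase
  rw [solution_eq_fold, solution_alt_eq_fold]
  exact h.1
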